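-- pv_equiv track=rewrite | github.com/RuYi-Ruan/complier_ks | tokenType.py | validate_float
-- ===== SOURCE A (Python) =====
-- def validate_float(lex: str) -> bool:
--     """
--     验证浮点数的格式是否合法
--     格式要求：
--       - 可选的正负号
--       - 至少一位数字
--       - 小数点
--       - 小数点后至少一位数字
--       - 可选的指数部分（e 或 E 后跟可选的正负号和数字）
--     """
--     pos = 0
--     n = len(lex)
--     if pos < n and lex[pos] in '+-':  # 检查可选正负号
--         pos += 1
--     start_digits = pos
--     # 检验整数位数
--     while pos < n and lex[pos].isdigit():
--         pos += 1
--     # 整数部分至少需要一位数字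
--     if pos == start_digits:
--         return False
--     # 验证一个浮点数字符串中是否包含必要的小数点部分
--     if pos >= n or lex[pos] != '.':
--         return False
--
--     pos += 1
--     start_frac = pos
--     # 小数部分至少需要一位数字
--     while pos < n and lex[pos].isdigit():
--         pos += 1
--     if pos == start_frac:
--         return False
--
--     # 检查指数部分
--     if pos < n and lex[pos] in 'eE':
--         pos += 1
--         if pos < n and lex[pos] in '+-':  # 可选的正负号
--             pos += 1
--         start_exp = pos
--         # 如果e后无数字则不合法
--         while pos < n and lex[pos].isdigit():
--             pos += 1
--         if pos == start_exp:
--             return False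
--     return pos == n  # 格式合法时，pos应当刚好到达字符串末尾
-- ===== SOURCE B (Python) =====
-- def validate_float(lex: str) -> bool:
--     # Strip an optional leading sign, split off the exponent at the first 'e'/'E',
--     # then judge mantissa and exponent substrings with str.isdigit.
--     s = lex[1:] if lex[:1] in ('+', '-') else lex
--     ei = next((i for i, c in enumerate(s) if c in 'eE'), -1)
--     mant, exp = (s, None) if ei < 0 else (s[:ei], s[ei + 1:])
--     ipart, dot, fpart = mant.partition('.')
--     ok = bool(dot) and ipart.isdigit() and fpart.isdigit()
--     if exp is not None:
--         if exp[:1] in ('+', '-'):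
--             exp = exp[1:]
--         ok = ok and exp.isdigit()
--     return ok
-- ===== Notes on version B (the rewrite author's own statement) =====
-- stated objective: simpler
-- what changed: A walks one cursor through the string with four sequential while/if scan phases; B instead splits the string into parts (cut at the first 'e'/'E', partition the mantissa at its first '.') and judges each piece with str.isdigit.
import Mathlib
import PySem

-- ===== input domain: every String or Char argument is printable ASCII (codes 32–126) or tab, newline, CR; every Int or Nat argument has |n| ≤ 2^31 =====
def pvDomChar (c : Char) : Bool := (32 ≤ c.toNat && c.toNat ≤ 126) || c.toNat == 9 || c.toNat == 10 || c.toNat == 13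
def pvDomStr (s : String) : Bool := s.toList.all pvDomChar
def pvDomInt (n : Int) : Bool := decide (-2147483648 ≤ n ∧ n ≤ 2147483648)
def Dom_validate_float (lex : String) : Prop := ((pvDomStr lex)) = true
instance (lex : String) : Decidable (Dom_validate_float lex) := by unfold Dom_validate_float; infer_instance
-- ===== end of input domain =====

-- B replaces A's single-cursor scan by split-and-judge: cut at the first 'e'/'E',
-- partition the mantissa at its first '.', and test the pieces with str.isdigit
-- (objective: simpler decomposition; same cost).

-- ===== PORT A =====
-- Port of A: the cursor `pos` is represented by the still-unread suffix of the
-- character list; each `while pos < n and lex[pos].isdigit(): pos += 1` loop is the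
-- corresponding dropWhile, `pos == start` checks become length comparisons, and each
-- sequential phase of A's body is a named helper on the remaining suffix.

-- `if pos < n and lex[pos] in '+-': pos += 1`
def vfSkipSignA : List Char → List Char
  | c :: rest => if c == '+' || c == '-' then rest else c :: rest
  | [] => []

-- the exponent-digit block: optional sign, then `if pos == start_exp: return False`,
-- then `return pos == n`
def vfExpTailA (s5 : List Char) : Bool :=
  let s6 := vfSkipSignA s5
  let s7 := s6.dropWhile PySem.Chars.isdigit
  if s7.length = s6.length then false else s7.isEmpty

-- after the fraction digits: `pos == n`, or an 'e'/'E' introducing the exponent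
def vfAfterFracA : List Char → Bool
  | [] => true
  | ch2 :: s5 => if ch2 == 'e' || ch2 == 'E' then vfExpTailA s5 else false

-- fraction digits: `if pos == start_frac: return False`
def vfFracA (s3 : List Char) : Bool :=
  let s4 := s3.dropWhile PySem.Chars.isdigit
  if s4.length = s3.length then false else vfAfterFracA s4

-- `if pos >= n or lex[pos] != '.': return False`
def vfDotA : List Char → Bool
  | [] => false
  | ch :: s3 => if ch == '.' then vfFracA s3 else false

-- integer digits: `if pos == start_digits: return False`
def vfRestA (s1 : List Char) : Bool :=
  let s2 := s1.dropWhile PySem.Chars.isdigit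
  if s2.length = s1.length then false else vfDotA s2

def validate_float (lex : String) : Bool :=
  vfRestA (vfSkipSignA lex.toList)

-- ===== PORT B =====
-- B's `s = lex[1:] if lex[:1] in ('+', '-') else lex`
def vfSkipSignB : List Char → List Char
  | c :: r => if c == '+' || c == '-' then r else c :: r
  | [] => []

-- mant.partition('.') followed by the two str.isdigit tests
-- (Python str.isdigit = PySem.Chars.strIsdigit on the char list; exact on ASCII)
def vfMantB (m : List Char) : Bool :=
  match m.findIdx? (fun c => c == '.') with
  | none => false
  | some i => PySem.Chars.strIsdigit (m.take i) && PySem.Chars.strIsdigit (m.drop (i + 1))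

-- the exponent substring: strip one optional sign, then str.isdigit
def vfExpB (e : List Char) : Bool :=
  PySem.Chars.strIsdigit (vfSkipSignB e)

-- split at the first 'e'/'E' (B's `next(... enumerate ...)` scan)
def vfRestB (s : List Char) : Bool :=
  match s.findIdx? (fun c => c == 'e' || c == 'E') with
  | none => vfMantB s
  | some i => vfMantB (s.take i) && vfExpB (s.drop (i + 1))

def validate_float_alt (lex : String) : Bool :=
  vfRestB (vfSkipSignB lex.toList)

-- ===== PRECONDITION & SPEC =====
def Spec_validate_float (lex : String) (out : Bool) : Prop := out = validate_float_alt lex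
instance (lex : String) (out : Bool) : Decidable (Spec_validate_float lex out) := by unfold Spec_validate_float; infer_instance

-- ===== CLAIM (what is proved, stated in full; the proofs are below) =====
def Claim_equal_validate_float : Prop := ∀ (lex : String), Dom_validate_float lex → Spec_validate_float lex (validate_float lex)

-- ===== LEMMAS AND PROOFS =====

theorem pv_skip_eq (e : List Char) : vfSkipSignA e = vfSkipSignB e := by
  cases e <;> rfl

-- a decimal digit is neither '.' nor 'e'/'E'
theorem pv_digit_ne {c : Char} (h : PySem.Chars.isdigit c = true) :
    (c == '.') = false ∧ (c == 'e' || c == 'E') = false := by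
  simp only [PySem.Chars.isdigit, Bool.and_eq_true, decide_eq_true_eq] at h
  obtain ⟨h1, h2⟩ := h
  refine ⟨?_, ?_⟩
  · rw [beq_eq_false_iff_ne]
    rintro rfl
    exact absurd h1 (by decide)
  · rw [Bool.or_eq_false_iff, beq_eq_false_iff_ne, beq_eq_false_iff_ne]
    constructor <;> rintro rfl
    · exact absurd h2 (by decide)
    · exact absurd h2 (by decide)

theorem pv_findIdx?_clean_prefix {p : Char → Bool} {t : List Char}
    (ht : ∀ x ∈ t, p x = false) (d : List Char) :
    List.findIdx? p (t ++ d) = (List.findIdx? p d).map (· + t.length) := by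
  induction t with
  | nil => cases h : List.findIdx? p d <;> simp [h]
  | cons a l ih =>
    have ha := ht a List.mem_cons_self
    rw [List.cons_append, List.findIdx?_cons, ha,
        ih (fun x hx => ht x (List.mem_cons_of_mem _ hx))]
    cases h : List.findIdx? p d with
    | none => simp
    | some j => simp; omega

theorem pv_strIsdigit_nil : PySem.Chars.strIsdigit [] = false := by decide

theorem pv_strIsdigit_head_false {c : Char} {r : List Char}
    (h : PySem.Chars.isdigit c = false) : PySem.Chars.strIsdigit (c :: r) = false := by
  simp [PySem.Chars.strIsdigit, h]

theorem pv_strIsdigit_append_bad {t r : List Char} {c : Char}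
    (h : PySem.Chars.isdigit c = false) : PySem.Chars.strIsdigit (t ++ c :: r) = false := by
  simp [PySem.Chars.strIsdigit, h]

theorem pv_strIsdigit_take_head_false {c : Char} {r : List Char}
    (h : PySem.Chars.isdigit c = false) (j : Nat) :
    PySem.Chars.strIsdigit ((c :: r).take j) = false := by
  cases j with
  | zero => exact pv_strIsdigit_nil
  | succ k => rw [List.take_succ_cons]; exact pv_strIsdigit_head_false h

theorem pv_strIsdigit_of_digits {t : List Char} (hne : t ≠ [])
    (ht : ∀ x ∈ t, PySem.Chars.isdigit x = true) : PySem.Chars.strIsdigit t = true := by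
  unfold PySem.Chars.strIsdigit
  rw [List.all_eq_true.mpr ht]
  cases t with
  | nil => exact absurd rfl hne
  | cons a l => rfl

-- A's exponent-digit scan computes str.isdigit of the remaining suffix
theorem pv_dropA_eq_strIsdigit (x : List Char) :
    (if (x.dropWhile PySem.Chars.isdigit).length = x.length then false
     else (x.dropWhile PySem.Chars.isdigit).isEmpty) = PySem.Chars.strIsdigit x := by
  cases x with
  | nil => simp [pv_strIsdigit_nil]
  | cons a l =>
    cases ha : PySem.Chars.isdigit a with
    | true =>
      have hdw : List.dropWhile PySem.Chars.isdigit (a :: l)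
          = List.dropWhile PySem.Chars.isdigit l := by
        rw [List.dropWhile_cons, if_pos ha]
      have hlen : (l.dropWhile PySem.Chars.isdigit).length ≠ (a :: l).length := by
        have := List.length_dropWhile_le PySem.Chars.isdigit l
        simp only [List.length_cons]; omega
      rw [hdw, if_neg hlen]
      have h1 : (List.dropWhile PySem.Chars.isdigit l).isEmpty
          = l.all PySem.Chars.isdigit := by
        rw [Bool.eq_iff_iff]
        simp [List.isEmpty_iff, List.dropWhile_eq_nil_iff, List.all_eq_true]
      have h2 : PySem.Chars.strIsdigit (a :: l) = l.all PySem.Chars.isdigit := by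
        simp [PySem.Chars.strIsdigit, ha]
      rw [h1, h2]
    | false =>
      have ha' : ¬(PySem.Chars.isdigit a = true) := by simp [ha]
      have hdw : List.dropWhile PySem.Chars.isdigit (a :: l) = a :: l := by
        rw [List.dropWhile_cons, if_neg ha']
      rw [hdw, if_pos rfl]
      exact (pv_strIsdigit_head_false ha).symm

-- take/drop around the split point of t ++ c :: r
theorem pv_take_mid (t : List Char) (c : Char) (r : List Char) (j : Nat) :
    (t ++ c :: r).take (j + 1 + t.length) = t ++ c :: r.take j := by
  rw [List.take_append, List.take_of_length_le (by omega)]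
  have h : j + 1 + t.length - t.length = j + 1 := by omega
  rw [h, List.take_succ_cons]

theorem pv_drop_mid (t : List Char) (c : Char) (r : List Char) (j : Nat) :
    (t ++ c :: r).drop (j + 1 + t.length + 1) = r.drop (j + 1) := by
  rw [show t ++ c :: r = (t ++ [c]) ++ r by simp]
  rw [List.drop_append, List.drop_eq_nil_of_le (by simp)]
  have h : j + 1 + t.length + 1 - (t ++ [c]).length = j + 1 := by simp
  rw [h, List.nil_append]

-- the head of a non-empty dropWhile result fails the predicate
theorem pv_dropWhile_head_false {p : Char → Bool} {l : List Char} {c : Char} {r : List Char}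
    (h : l.dropWhile p = c :: r) : p c = false := by
  induction l with
  | nil => simp at h
  | cons a l ih =>
    rw [List.dropWhile_cons] at h
    by_cases ha : p a = true
    · rw [if_pos ha] at h; exact ih h
    · rw [if_neg ha] at h
      injection h with h1 _
      subst h1
      simpa using ha

-- the mantissa judge rejects any list whose head is not a digit
theorem pv_vfMantB_head_false {c : Char} {m : List Char}
    (h : PySem.Chars.isdigit c = false) : vfMantB (c :: m) = false := by
  unfold vfMantB
  rw [List.findIdx?_cons]
  by_cases hc : ((fun c => c == '.') c) = true
  · rw [if_pos hc]
    simp [pv_strIsdigit_nil]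
  · rw [if_neg hc]
    cases hfi : List.findIdx? (fun c => c == '.') m with
    | none => simp
    | some i =>
      simp only [Option.map_some, List.take_succ_cons]
      rw [pv_strIsdigit_head_false h]
      rfl

-- the mantissa judge rejects digits* ++ non-digit-non-dot ++ anything
theorem pv_vfMantB_mixed {t : List Char} {c : Char} {r : List Char}
    (ht : ∀ x ∈ t, PySem.Chars.isdigit x = true)
    (hcD : PySem.Chars.isdigit c = false) (hcdot : (c == '.') = false) :
    vfMantB (t ++ c :: r) = false := by
  unfold vfMantB
  rw [pv_findIdx?_clean_prefix (fun x hx => (pv_digit_ne (ht x hx)).1) (c :: r),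
      List.findIdx?_cons, if_neg (by simp [hcdot])]
  cases hfi : List.findIdx? (fun c => c == '.') r with
  | none => simp
  | some j =>
    simp only [Option.map_some]
    rw [pv_take_mid, pv_strIsdigit_append_bad hcD]
    rfl

-- the mantissa judge on digits* ++ '.' :: rest
theorem pv_vfMantB_split {t : List Char} (f : List Char)
    (ht : ∀ x ∈ t, PySem.Chars.isdigit x = true) :
    vfMantB (t ++ '.' :: f) = (PySem.Chars.strIsdigit t && PySem.Chars.strIsdigit f) := by
  unfold vfMantB
  rw [pv_findIdx?_clean_prefix (fun x hx => (pv_digit_ne (ht x hx)).1) ('.' :: f),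
      List.findIdx?_cons, if_pos (by decide)]
  simp only [Option.map_some, Nat.zero_add]
  have h1 : (t ++ '.' :: f).take t.length = t := List.take_left
  have h2 : (t ++ '.' :: f).drop (t.length + 1) = f := by
    rw [show t ++ '.' :: f = (t ++ ['.']) ++ f by simp]
    exact List.drop_left' (by simp)
  rw [h1, h2]

-- B's whole judge rejects any list whose head is not a digit
theorem pv_vfRestB_head_false {c : Char} {s' : List Char}
    (hc : PySem.Chars.isdigit c = false) : vfRestB (c :: s') = false := by
  unfold vfRestB
  rw [List.findIdx?_cons]
  by_cases he : ((fun c => c == 'e' || c == 'E') c) = true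
  · rw [if_pos he]
    simp [vfMantB]
  · rw [if_neg he]
    cases hfi : List.findIdx? (fun c => c == 'e' || c == 'E') s' with
    | none => simpa using pv_vfMantB_head_false (m := s') hc
    | some i =>
      simp only [Option.map_some, List.take_succ_cons]
      rw [pv_vfMantB_head_false hc]
      rfl

-- B's whole judge rejects digits* ++ non-digit-non-dot ++ anything
theorem pv_vfRestB_mixed {t : List Char} {c : Char} {r : List Char}
    (ht : ∀ x ∈ t, PySem.Chars.isdigit x = true)
    (hcD : PySem.Chars.isdigit c = false) (hcdot : (c == '.') = false) :
    vfRestB (t ++ c :: r) = false := by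
  unfold vfRestB
  rw [pv_findIdx?_clean_prefix (fun x hx => (pv_digit_ne (ht x hx)).2) (c :: r),
      List.findIdx?_cons]
  by_cases he : ((fun c => c == 'e' || c == 'E') c) = true
  · rw [if_pos he]
    simp only [Option.map_some, Nat.zero_add]
    rw [List.take_left]
    have hm : vfMantB t = false := by
      unfold vfMantB
      rw [List.findIdx?_eq_none_iff.mpr (fun x hx => (pv_digit_ne (ht x hx)).1)]
    rw [hm]
    rfl
  · rw [if_neg he]
    cases hfi : List.findIdx? (fun c => c == 'e' || c == 'E') r with
    | none => simpa using pv_vfMantB_mixed ht hcD hcdot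
    | some j =>
      simp only [Option.map_some]
      rw [pv_take_mid, pv_vfMantB_mixed ht hcD hcdot]
      rfl

-- B's whole judge on digits* ++ '.' :: r, when r has no 'e'/'E'
theorem pv_vfRestB_dot_none {t : List Char} (r : List Char)
    (ht : ∀ x ∈ t, PySem.Chars.isdigit x = true)
    (hfi : List.findIdx? (fun c => c == 'e' || c == 'E') r = none) :
    vfRestB (t ++ '.' :: r) = (PySem.Chars.strIsdigit t && PySem.Chars.strIsdigit r) := by
  unfold vfRestB
  rw [pv_findIdx?_clean_prefix (fun x hx => (pv_digit_ne (ht x hx)).2) ('.' :: r),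
      List.findIdx?_cons, if_neg (by decide), hfi]
  simp only [Option.map_none]
  exact pv_vfMantB_split r ht

-- B's whole judge on digits* ++ '.' :: r, when r's first 'e'/'E' is at index j
theorem pv_vfRestB_dot_some {t : List Char} (r : List Char) {j : Nat}
    (ht : ∀ x ∈ t, PySem.Chars.isdigit x = true)
    (hfi : List.findIdx? (fun c => c == 'e' || c == 'E') r = some j) :
    vfRestB (t ++ '.' :: r) =
      ((PySem.Chars.strIsdigit t && PySem.Chars.strIsdigit (r.take j))
        && vfExpB (r.drop (j + 1))) := by
  unfold vfRestB
  rw [pv_findIdx?_clean_prefix (fun x hx => (pv_digit_ne (ht x hx)).2) ('.' :: r),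
      List.findIdx?_cons, if_neg (by decide), hfi]
  simp only [Option.map_some]
  rw [pv_take_mid, pv_drop_mid, pv_vfMantB_split (r.take j) ht]

-- the central equation: the two judges agree on the sign-stripped list
theorem pv_rest_eq (s : List Char) : vfRestA s = vfRestB s := by
  have hs : s.takeWhile PySem.Chars.isdigit ++ s.dropWhile PySem.Chars.isdigit = s :=
    List.takeWhile_append_dropWhile
  have htd : ∀ x ∈ s.takeWhile PySem.Chars.isdigit, PySem.Chars.isdigit x = true :=
    fun _ hx => List.mem_takeWhile_imp hx
  by_cases htnil : s.takeWhile PySem.Chars.isdigit = []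
  · have hds : s.dropWhile PySem.Chars.isdigit = s := by
      rw [htnil, List.nil_append] at hs; exact hs
    have hA : vfRestA s = false := by
      simp only [vfRestA]
      rw [hds, if_pos rfl]
    rw [hA]
    cases s with
    | nil => rfl
    | cons c s' =>
      have hc : PySem.Chars.isdigit c = false := by
        cases hcb : PySem.Chars.isdigit c with
        | false => rfl
        | true =>
          rw [List.takeWhile_cons, if_pos hcb] at htnil
          exact absurd htnil (List.cons_ne_nil _ _)
      exact (pv_vfRestB_head_false hc).symm
  · have hlenA : (s.dropWhile PySem.Chars.isdigit).length ≠ s.length := by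
      have h1 := congrArg List.length hs
      rw [List.length_append] at h1
      have h2 : (s.takeWhile PySem.Chars.isdigit).length ≠ 0 := by
        simpa [List.length_eq_zero_iff] using htnil
      omega
    cases hd : s.dropWhile PySem.Chars.isdigit with
    | nil =>
      have hseq : s = s.takeWhile PySem.Chars.isdigit := by
        conv_lhs => rw [← hs, hd]
        exact List.append_nil _
      have hsall : ∀ x ∈ s, PySem.Chars.isdigit x = true := by
        intro x hx; rw [hseq] at hx; exact htd x hx
      have hA : vfRestA s = false := by
        simp only [vfRestA]
        rw [hd, if_neg (by rw [hd] at hlenA; exact hlenA)]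
        rfl
      have hB : vfRestB s = false := by
        unfold vfRestB
        rw [List.findIdx?_eq_none_iff.mpr (fun x hx => (pv_digit_ne (hsall x hx)).2)]
        unfold vfMantB
        rw [List.findIdx?_eq_none_iff.mpr (fun x hx => (pv_digit_ne (hsall x hx)).1)]
      rw [hA, hB]
    | cons c r =>
      have hcD : PySem.Chars.isdigit c = false := pv_dropWhile_head_false hd
      have hsplit : s = s.takeWhile PySem.Chars.isdigit ++ c :: r := by
        conv_lhs => rw [← hs, hd]
      rw [hd] at hlenA
      have hA0 : vfRestA s = vfDotA (c :: r) := by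
        simp only [vfRestA]
        rw [hd, if_neg hlenA]
      rw [hA0]
      by_cases hcdot : c = '.'
      · subst hcdot
        conv_rhs => rw [hsplit]
        simp only [vfDotA]
        rw [if_pos (by decide)]
        simp only [vfFracA]
        have hr : r.takeWhile PySem.Chars.isdigit ++ r.dropWhile PySem.Chars.isdigit = r :=
          List.takeWhile_append_dropWhile
        have htr : ∀ x ∈ r.takeWhile PySem.Chars.isdigit, PySem.Chars.isdigit x = true :=
          fun _ hx => List.mem_takeWhile_imp hx
        by_cases ht2nil : r.takeWhile PySem.Chars.isdigit = []
        · have hdr : r.dropWhile PySem.Chars.isdigit = r := by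
            rw [ht2nil, List.nil_append] at hr; exact hr
          rw [hdr, if_pos rfl]
          cases r with
          | nil =>
            rw [pv_vfRestB_dot_none [] htd rfl]
            simp [pv_strIsdigit_nil]
          | cons c2 r' =>
            have hc2 : PySem.Chars.isdigit c2 = false := by
              cases hcb : PySem.Chars.isdigit c2 with
              | false => rfl
              | true =>
                rw [List.takeWhile_cons, if_pos hcb] at ht2nil
                exact absurd ht2nil (List.cons_ne_nil _ _)
            cases hfi0 : List.findIdx? (fun c => c == 'e' || c == 'E') (c2 :: r') with
            | none =>
              rw [pv_vfRestB_dot_none _ htd hfi0]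
              simp [pv_strIsdigit_head_false hc2]
            | some j =>
              rw [pv_vfRestB_dot_some _ htd hfi0]
              simp [pv_strIsdigit_take_head_false hc2 j]
        · have hlen2 : (r.dropWhile PySem.Chars.isdigit).length ≠ r.length := by
            have h1 := congrArg List.length hr
            rw [List.length_append] at h1
            have h2 : (r.takeWhile PySem.Chars.isdigit).length ≠ 0 := by
              simpa [List.length_eq_zero_iff] using ht2nil
            omega
          rw [if_neg hlen2]
          cases hd2 : r.dropWhile PySem.Chars.isdigit with
          | nil =>
            have hreq : r = r.takeWhile PySem.Chars.isdigit := by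
              conv_lhs => rw [← hr, hd2]
              exact List.append_nil _
            have hrall : ∀ x ∈ r, PySem.Chars.isdigit x = true := by
              intro x hx; rw [hreq] at hx; exact htr x hx
            have hrne : r ≠ [] := by
              intro h0
              rw [h0] at hlen2
              simp at hlen2
            rw [pv_vfRestB_dot_none r htd
                  (List.findIdx?_eq_none_iff.mpr
                    (fun x hx => (pv_digit_ne (hrall x hx)).2)),
                pv_strIsdigit_of_digits htnil htd, pv_strIsdigit_of_digits hrne hrall]
            rfl
          | cons c2 r2 =>
            have hc2D : PySem.Chars.isdigit c2 = false := pv_dropWhile_head_false hd2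
            set t2 := r.takeWhile PySem.Chars.isdigit with ht2def
            simp only [vfAfterFracA]
            by_cases he2 : (c2 == 'e' || c2 == 'E') = true
            · rw [if_pos he2]
              simp only [vfExpTailA]
              rw [pv_dropA_eq_strIsdigit]
              have hfi : List.findIdx? (fun c => c == 'e' || c == 'E') r
                  = some t2.length := by
                conv_lhs => rw [← hr, hd2]
                rw [pv_findIdx?_clean_prefix (fun x hx => (pv_digit_ne (htr x hx)).2)
                      (c2 :: r2),
                    List.findIdx?_cons, if_pos he2]
                simp
              rw [pv_vfRestB_dot_some r htd hfi]
              have htk : r.take t2.length = t2 := by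
                conv_lhs => rw [← hr, hd2]
                exact List.take_left
              have hdp : r.drop (t2.length + 1) = r2 := by
                conv_lhs => rw [← hr, hd2]
                rw [show t2 ++ c2 :: r2 = (t2 ++ [c2]) ++ r2 by simp]
                exact List.drop_left' (by simp)
              rw [htk, hdp, pv_strIsdigit_of_digits htnil htd,
                  pv_strIsdigit_of_digits ht2nil htr]
              simp only [Bool.true_and]
              rw [pv_skip_eq]
              rfl
            · rw [if_neg he2]
              have he2' : ¬((fun c => c == 'e' || c == 'E') c2) = true := by
                simpa using he2
              cases hfi2 : List.findIdx? (fun c => c == 'e' || c == 'E') r2 with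
              | none =>
                have hfi : List.findIdx? (fun c => c == 'e' || c == 'E') r = none := by
                  conv_lhs => rw [← hr, hd2]
                  rw [pv_findIdx?_clean_prefix (fun x hx => (pv_digit_ne (htr x hx)).2)
                        (c2 :: r2),
                      List.findIdx?_cons, if_neg he2', hfi2]
                  rfl
                have hbad : PySem.Chars.strIsdigit r = false := by
                  conv_lhs => rw [← hr, hd2]
                  exact pv_strIsdigit_append_bad hc2D
                rw [pv_vfRestB_dot_none r htd hfi, hbad]
                simp
              | some k =>
                have hfi : List.findIdx? (fun c => c == 'e' || c == 'E') r
                    = some (k + 1 + t2.length) := by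
                  conv_lhs => rw [← hr, hd2]
                  rw [pv_findIdx?_clean_prefix (fun x hx => (pv_digit_ne (htr x hx)).2)
                        (c2 :: r2),
                      List.findIdx?_cons, if_neg he2', hfi2]
                  rfl
                have hbad : PySem.Chars.strIsdigit (r.take (k + 1 + t2.length)) = false := by
                  conv_lhs => rw [← hr, hd2]
                  rw [pv_take_mid]
                  exact pv_strIsdigit_append_bad hc2D
                rw [pv_vfRestB_dot_some r htd hfi, hbad]
                simp
      · have hcdot' : (c == '.') = false := by simpa using hcdot
        have hA : vfDotA (c :: r) = false := by
          simp only [vfDotA]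
          rw [if_neg (by simp [hcdot'])]
        have hB : vfRestB s = false := by
          rw [hsplit]
          exact pv_vfRestB_mixed htd hcD hcdot'
        rw [hA, hB]

-- ===== VERDICT (by name: the statement is the Claim_ definition above) =====
theorem validate_float_spec : Claim_equal_validate_float := by
  intro lex _
  show validate_float lex = validate_float_alt lex
  unfold validate_float validate_float_alt
  rw [← pv_skip_eq]
  exact pv_rest_eq _
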